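-- pv_equiv track=rewrite | github.com/Dietetics/Q3 | frites.py | can_place_fries_exact_dp
-- ===== SOURCE A (Python) =====
-- def can_place_fries_exact_dp(points, k, h_conflicts, v_conflicts):
--     """Exact DP for small instances"""
--     n = len(points)
--
--     # Convert conflicts to bitmasks for faster checking
--     h_conflict_masks = {}
--     v_conflict_masks = {}
--
--     for i, j in h_conflicts:
--         if i not in h_conflict_masks:
--             h_conflict_masks[i] = 0
--         if j not in h_conflict_masks:
--             h_conflict_masks[j] = 0
--         h_conflict_masks[i] |= (1 << j)
--         h_conflict_masks[j] |= (1 << i)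
--
--     for i, j in v_conflicts:
--         if i not in v_conflict_masks:
--             v_conflict_masks[i] = 0
--         if j not in v_conflict_masks:
--             v_conflict_masks[j] = 0
--         v_conflict_masks[i] |= (1 << j)
--         v_conflict_masks[j] |= (1 << i)
--
--     # DP approach: try orientations more intelligently
--     memo = {}
--
--     def dp(pos, h_assigned, v_assigned):
--         """DP function: pos=current position, h/v_assigned=bitmasks of assigned orientations"""
--         if pos == n:
--             return True
--
--         state = (pos, h_assigned, v_assigned)
--         if state in memo:
--             return memo[state]
--
--         # Try horizontal orientation
--         can_horizontal = True
--         if pos in h_conflict_masks: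
--             # Check if any conflicting point is already horizontal
--             if h_conflict_masks[pos] & h_assigned:
--                 can_horizontal = False
--
--         if can_horizontal:
--             new_h = h_assigned | (1 << pos)
--             if dp(pos + 1, new_h, v_assigned):
--                 memo[state] = True
--                 return True
--
--         # Try vertical orientation
--         can_vertical = True
--         if pos in v_conflict_masks:
--             # Check if any conflicting point is already vertical
--             if v_conflict_masks[pos] & v_assigned:
--                 can_vertical = False
--
--         if can_vertical:
--             new_v = v_assigned | (1 << pos)
--             if dp(pos + 1, h_assigned, new_v):
--                 memo[state] = True
--                 return True
--
--         memo[state] = False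
--         return False
--
--     return dp(0, 0, 0)
-- ===== SOURCE B (Python) =====
-- def can_place_fries_exact_dp(points, k, h_conflicts, v_conflicts):
--     """2-SAT via implication-graph reachability: variable i is 'horizontal';
--     an h-conflict (i,j) forbids both horizontal, a v-conflict forbids both
--     vertical.  Infeasible iff some variable reaches its own negation in both
--     directions.  Literal encoding: 2*i = 'i horizontal', 2*i+1 = 'i vertical'."""
--     n = len(points)
--     adj = [[] for _ in range(2 * n)]
--     for i, j in h_conflicts:
--         if 0 <= i < n and 0 <= j < n and i != j:
--             adj[2 * i].append(2 * j + 1)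
--             adj[2 * j].append(2 * i + 1)
--     for i, j in v_conflicts:
--         if 0 <= i < n and 0 <= j < n and i != j:
--             adj[2 * i + 1].append(2 * j)
--             adj[2 * j + 1].append(2 * i)
--
--     def closure(s):
--         vis = {s}
--         for _ in range(2 * n):
--             nxt = vis | {w for u in vis for w in adj[u]}
--             if len(nxt) == len(vis):
--                 break
--             vis = nxt
--         return vis
--
--     for x in range(n):
--         if 2 * x + 1 in closure(2 * x) and 2 * x in closure(2 * x + 1):
--             return False
--     return True
-- ===== Notes on version B (the rewrite author's own statement) =====
-- stated objective: faster
-- what changed: A's exponential memoized backtracking over orientation assignments is replaced by a polynomial 2-SAT decision on the implication graph: build literal adjacency (2i = 'i horizontal', 2i+1 = 'i vertical') and report infeasible iff some variable reaches its own negation in both directions (reachability by iterated frontier expansion).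
import Mathlib
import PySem

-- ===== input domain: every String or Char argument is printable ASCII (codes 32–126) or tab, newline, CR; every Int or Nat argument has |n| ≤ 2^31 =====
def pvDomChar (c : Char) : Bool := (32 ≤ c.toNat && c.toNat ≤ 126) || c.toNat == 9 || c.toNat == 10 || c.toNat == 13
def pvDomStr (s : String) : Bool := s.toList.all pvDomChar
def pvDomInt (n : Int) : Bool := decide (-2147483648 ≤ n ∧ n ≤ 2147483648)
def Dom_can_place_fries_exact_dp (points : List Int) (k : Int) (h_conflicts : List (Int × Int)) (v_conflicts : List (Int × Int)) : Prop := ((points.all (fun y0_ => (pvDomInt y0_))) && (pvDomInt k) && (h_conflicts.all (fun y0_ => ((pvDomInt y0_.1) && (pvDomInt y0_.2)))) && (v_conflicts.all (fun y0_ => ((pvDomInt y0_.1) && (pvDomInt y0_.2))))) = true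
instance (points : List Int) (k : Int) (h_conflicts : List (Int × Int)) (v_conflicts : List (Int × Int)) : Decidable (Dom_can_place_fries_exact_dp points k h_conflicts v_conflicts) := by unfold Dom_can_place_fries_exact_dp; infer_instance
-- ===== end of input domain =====

-- B replaces A's exponential memoized backtracking by a polynomial 2-SAT check on the
-- implication graph (a variable is infeasible iff it reaches its own negation both ways).

-- ===== PORT A =====
-- builds h_conflict_masks / v_conflict_masks: dict int -> bitmask.  Mask values are
-- Python non-negative ints, represented as Nat; '1 << j' is exact for j ≥ 0 (Pre_).
def pvBuildMask (cs : List (Int × Int)) : PySem.Dict Int Nat :=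
  cs.foldl (fun d p =>
    let d := if d.contains p.1 then d else d.insert p.1 0
    let d := if d.contains p.2 then d else d.insert p.2 0
    let d := d.insert p.1 ((d.getD p.1 0) ||| (1 <<< p.2.toNat))
    d.insert p.2 ((d.getD p.2 0) ||| (1 <<< p.1.toNat))) PySem.Dict.empty

-- dp(pos, h_assigned, v_assigned) with the memo dict threaded through; recursion on
-- fuel = n - pos (the '| 0' branch is never reached: every call has fuel = n - pos).
def pvDpA (n : Nat) (hm vm : PySem.Dict Int Nat) :
    Nat → Nat → Nat → Nat → PySem.Dict (Nat × Nat × Nat) Bool →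
    Bool × PySem.Dict (Nat × Nat × Nat) Bool
  | fuel, pos, h, v, memo =>
    if pos = n then (true, memo)
    else match fuel with
      | 0 => (true, memo)
      | fuel + 1 =>
        match memo.get? (pos, h, v) with
        | some b => (b, memo)
        | none =>
          -- can_horizontal: False iff pos has an h-mask intersecting h_assigned
          let canH : Bool := if hm.contains (pos : Int) then ((hm.getD (pos : Int) 0) &&& h == 0) else true
          let r1 :=
            if canH then pvDpA n hm vm fuel (pos + 1) (h ||| (1 <<< pos)) v memo
            else (false, memo)
          if r1.1 then (true, r1.2.insert (pos, h, v) true)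
          else
            let canV : Bool := if vm.contains (pos : Int) then ((vm.getD (pos : Int) 0) &&& v == 0) else true
            let r2 :=
              if canV then pvDpA n hm vm fuel (pos + 1) h (v ||| (1 <<< pos)) r1.2
              else (false, r1.2)
            if r2.1 then (true, r2.2.insert (pos, h, v) true)
            else (false, r2.2.insert (pos, h, v) false)

def can_place_fries_exact_dp (points : List Int) (k : Int) (h_conflicts : List (Int × Int)) (v_conflicts : List (Int × Int)) : Bool :=
  let n := points.length
  let hm := pvBuildMask h_conflicts
  let vm := pvBuildMask v_conflicts
  (pvDpA n hm vm n 0 0 0 PySem.Dict.empty).1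

-- ===== PORT B =====
-- literal encoding: 2*i = "i horizontal", 2*i+1 = "i vertical".
-- adj = [[] for _ in range(2*n)], then appends at in-range indices (pySetD/pyGetD are
-- exact here: every index used is in [0, 2n)).
def pvAdjAdd (n : Int) (horiz : Bool) (adj : List (List Int)) (p : Int × Int) : List (List Int) :=
  if 0 ≤ p.1 ∧ p.1 < n ∧ 0 ≤ p.2 ∧ p.2 < n ∧ p.1 ≠ p.2 then
    if horiz then
      let adj := PySem.List.pySetD adj (2 * p.1) ((PySem.List.pyGetD adj (2 * p.1) []) ++ [2 * p.2 + 1])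
      PySem.List.pySetD adj (2 * p.2) ((PySem.List.pyGetD adj (2 * p.2) []) ++ [2 * p.1 + 1])
    else
      let adj := PySem.List.pySetD adj (2 * p.1 + 1) ((PySem.List.pyGetD adj (2 * p.1 + 1) []) ++ [2 * p.2])
      PySem.List.pySetD adj (2 * p.2 + 1) ((PySem.List.pyGetD adj (2 * p.2 + 1) []) ++ [2 * p.1])
  else adj

def pvAdjB (n : Int) (h_conflicts v_conflicts : List (Int × Int)) : List (List Int) :=
  let adj : List (List Int) := (PySem.List.pyRange 0 (2 * n) 1).map (fun _ => [])
  let adj := h_conflicts.foldl (pvAdjAdd n true) adj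
  v_conflicts.foldl (pvAdjAdd n false) adj

-- 'for _ in range(2*n)' with the early break when the set stopped growing
def pvClosLoop (adj : List (List Int)) : Nat → PySem.Set Int → PySem.Set Int
  | 0, vis => vis
  | fuel + 1, vis =>
    let nxt := PySem.Set.union vis (PySem.Set.ofList (vis.flatMap (fun u => PySem.List.pyGetD adj u [])))
    if nxt.length = vis.length then vis else pvClosLoop adj fuel nxt

def pvClosure (n : Int) (adj : List (List Int)) (s : Int) : PySem.Set Int :=
  pvClosLoop adj (2 * n).toNat (PySem.Set.ofList [s])

def can_place_fries_exact_dp_alt (points : List Int) (k : Int) (h_conflicts : List (Int × Int)) (v_conflicts : List (Int × Int)) : Bool :=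
  let n : Int := points.length
  let adj := pvAdjB n h_conflicts v_conflicts
  (PySem.List.pyRange 0 n 1).all (fun x =>
    !(PySem.Set.contains (pvClosure n adj (2 * x)) (2 * x + 1) &&
      PySem.Set.contains (pvClosure n adj (2 * x + 1)) (2 * x)))

-- ===== PRECONDITION & SPEC =====
-- Pre_ excludes conflict pairs with a negative component: there A raises
-- ValueError ('1 << j' with j < 0) and returns nothing.
def Pre_can_place_fries_exact_dp (points : List Int) (k : Int) (h_conflicts : List (Int × Int)) (v_conflicts : List (Int × Int)) : Prop :=
  (∀ p ∈ h_conflicts, 0 ≤ p.1 ∧ 0 ≤ p.2) ∧ (∀ p ∈ v_conflicts, 0 ≤ p.1 ∧ 0 ≤ p.2)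
instance (points : List Int) (k : Int) (h_conflicts : List (Int × Int)) (v_conflicts : List (Int × Int)) : Decidable (Pre_can_place_fries_exact_dp points k h_conflicts v_conflicts) := by unfold Pre_can_place_fries_exact_dp; infer_instance

def pvWitness_can_place_fries_exact_dp : List Int × Int × (List (Int × Int)) × (List (Int × Int)) :=
  ([0, 0], 0, [(0, 1)], [(0, 1)])

def Spec_can_place_fries_exact_dp (points : List Int) (k : Int) (h_conflicts : List (Int × Int)) (v_conflicts : List (Int × Int)) (out : Bool) : Prop := out = can_place_fries_exact_dp_alt points k h_conflicts v_conflicts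
instance (points : List Int) (k : Int) (h_conflicts : List (Int × Int)) (v_conflicts : List (Int × Int)) (out : Bool) : Decidable (Spec_can_place_fries_exact_dp points k h_conflicts v_conflicts out) := by unfold Spec_can_place_fries_exact_dp; infer_instance

-- ===== CLAIM (what is proved, stated in full; the proofs are below) =====
def Claim_equal_can_place_fries_exact_dp : Prop := ∀ (points : List Int) (k : Int) (h_conflicts : List (Int × Int)) (v_conflicts : List (Int × Int)), Dom_can_place_fries_exact_dp points k h_conflicts v_conflicts → Pre_can_place_fries_exact_dp points k h_conflicts v_conflicts → Spec_can_place_fries_exact_dp points k h_conflicts v_conflicts (can_place_fries_exact_dp points k h_conflicts v_conflicts)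

-- ===== LEMMAS AND PROOFS =====

-- ---------- shared semantic layer ----------

-- the conflict pairs that actually constrain anything: both endpoints in [0, n), distinct
def pvEff (n : Int) (cs : List (Int × Int)) : List (Int × Int) :=
  cs.filter (fun p => decide (0 ≤ p.1 ∧ p.1 < n ∧ 0 ≤ p.2 ∧ p.2 < n ∧ p.1 ≠ p.2))

def pvSat (n : Int) (hc vc : List (Int × Int)) : Prop :=
  ∃ f : Int → Bool,
    (∀ p ∈ pvEff n hc, ¬(f p.1 = true ∧ f p.2 = true)) ∧
    (∀ p ∈ pvEff n vc, f p.1 = true ∨ f p.2 = true)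

-- ---------- A side ----------

def pvMaskSpec (cs : List (Int × Int)) (d : PySem.Dict Int Nat) : Prop :=
  ∀ t q, (d.getD t 0).testBit q = true ↔
      ∃ p ∈ cs, (p.1 = t ∧ q = p.2.toNat) ∨ (p.2 = t ∧ q = p.1.toNat)

lemma pvBitShift (k q : Nat) : (1 <<< k).testBit q = (decide (q = k)) := by
  rw [Nat.testBit_shiftLeft]
  rcases Nat.lt_trichotomy q k with h | h | h
  · have h1 : ¬ (q ≥ k) := by omega
    have h2 : q ≠ k := by omega
    simp [h1, h2]
  · subst h; simp
  · have h1 : q ≥ k := by omega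
    have h2 : q ≠ k := by omega
    simp only [ge_iff_le, h1, decide_true, Bool.true_and, h2, decide_false]
    rw [show (1 : Nat) = 2 ^ 0 by rfl, Nat.testBit_two_pow]
    simp
    omega

lemma pvPrepGetD (d : PySem.Dict Int Nat) (k t : Int) :
    (if d.contains k then d else d.insert k 0).getD t 0 = d.getD t 0 := by
  split
  · rfl
  · rename_i hnc
    rw [PySem.Dict.getD_insert]
    split
    · rename_i ht
      subst ht
      rw [PySem.Dict.getD_of_not_contains _ _ (by simpa using hnc)]
    · rfl

lemma pvMaskStep_char (d : PySem.Dict Int Nat) (p : Int × Int) (t : Int) (q : Nat) :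
    (((let d1 := if d.contains p.1 then d else d.insert p.1 0;
       let d2 := if d1.contains p.2 then d1 else d1.insert p.2 0;
       let d3 := d2.insert p.1 ((d2.getD p.1 0) ||| (1 <<< p.2.toNat));
       d3.insert p.2 ((d3.getD p.2 0) ||| (1 <<< p.1.toNat))).getD t 0).testBit q = true) ↔
      ((d.getD t 0).testBit q = true ∨ (p.1 = t ∧ q = p.2.toNat) ∨ (p.2 = t ∧ q = p.1.toNat)) := by
  have hprep : ∀ s, ((if d.contains p.1 then d else d.insert p.1 0).getD s 0) = d.getD s 0 :=
    fun s => pvPrepGetD d p.1 s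
  have hprep2 : ∀ s,
      ((if (if d.contains p.1 then d else d.insert p.1 0).contains p.2
        then (if d.contains p.1 then d else d.insert p.1 0)
        else (if d.contains p.1 then d else d.insert p.1 0).insert p.2 0).getD s 0) = d.getD s 0 :=
    fun s => (pvPrepGetD _ p.2 s).trans (hprep s)
  simp only []
  rw [PySem.Dict.getD_insert]
  rcases eq_or_ne t p.2 with rfl | ht2
  · rw [if_pos rfl, PySem.Dict.getD_insert]
    rcases eq_or_ne p.2 p.1 with heq | ht1
    · rw [if_pos heq, hprep2, heq]
      simp only [Nat.testBit_or, pvBitShift, Bool.or_eq_true, decide_eq_true_eq]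
      tauto
    · rw [if_neg ht1, hprep2]
      simp only [Nat.testBit_or, pvBitShift, Bool.or_eq_true, decide_eq_true_eq]
      have ht1' : p.1 ≠ p.2 := fun h => ht1 h.symm
      tauto
  · rw [if_neg ht2, PySem.Dict.getD_insert]
    rcases eq_or_ne t p.1 with rfl | ht1
    · rw [if_pos rfl, hprep2]
      simp only [Nat.testBit_or, pvBitShift, Bool.or_eq_true, decide_eq_true_eq]
      have ht2' : p.2 ≠ p.1 := fun h => ht2 h.symm
      tauto
    · rw [if_neg ht1, hprep2]
      constructor
      · intro hb
        exact Or.inl hb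
      · rintro (hb | ⟨h1, h2⟩ | ⟨h1, h2⟩)
        · exact hb
        · exact absurd h1.symm ht1
        · exact absurd h1.symm ht2

lemma pvBuildMask_fold (cs : List (Int × Int)) : ∀ (d : PySem.Dict Int Nat) (t : Int) (q : Nat),
    ((cs.foldl (fun d p =>
      let d := if d.contains p.1 then d else d.insert p.1 0
      let d := if d.contains p.2 then d else d.insert p.2 0
      let d := d.insert p.1 ((d.getD p.1 0) ||| (1 <<< p.2.toNat))
      d.insert p.2 ((d.getD p.2 0) ||| (1 <<< p.1.toNat))) d).getD t 0).testBit q = true ↔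
    ((d.getD t 0).testBit q = true ∨
      ∃ p ∈ cs, (p.1 = t ∧ q = p.2.toNat) ∨ (p.2 = t ∧ q = p.1.toNat)) := by
  induction cs with
  | nil => intro d t q; simp
  | cons p rest ih =>
    intro d t q
    rw [List.foldl_cons, ih]
    simp only []
    rw [pvMaskStep_char d p t q]
    simp only [List.mem_cons]
    constructor
    · rintro ((hb | hsh) | ⟨p', hp', hsh⟩)
      · exact Or.inl hb
      · exact Or.inr ⟨p, Or.inl rfl, hsh⟩
      · exact Or.inr ⟨p', Or.inr hp', hsh⟩
    · rintro (hb | ⟨p', (rfl | hp'), hsh⟩)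
      · exact Or.inl (Or.inl hb)
      · exact Or.inl (Or.inr hsh)
      · exact Or.inr ⟨p', hp', hsh⟩

lemma pvBuildMask_spec (cs : List (Int × Int)) : pvMaskSpec cs (pvBuildMask cs) := by
  intro t q
  unfold pvBuildMask
  rw [pvBuildMask_fold]
  rw [PySem.Dict.getD_empty]
  simp [Nat.zero_testBit]

def pvWFb (pos h v : Nat) : Prop :=
  ∀ q, (h.testBit q = true → q < pos) ∧ (v.testBit q = true → q < pos) ∧
       ¬(h.testBit q = true ∧ v.testBit q = true) ∧
       (q < pos → h.testBit q = true ∨ v.testBit q = true)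

def pvSpecExt (n : Nat) (Eh Ev : List (Int × Int)) (pos h : Nat) : Prop :=
  ∃ f : Int → Bool,
    (∀ q : Nat, q < pos → f (q : Int) = h.testBit q) ∧
    (∀ p ∈ Eh, (pos : Int) ≤ max p.1 p.2 → ¬(f p.1 = true ∧ f p.2 = true)) ∧
    (∀ p ∈ Ev, (pos : Int) ≤ max p.1 p.2 → f p.1 = true ∨ f p.2 = true)

def pvMemoOK (n : Nat) (Eh Ev : List (Int × Int)) (memo : PySem.Dict (Nat × Nat × Nat) Bool) : Prop :=
  ∀ s b, memo.get? s = some b →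
    pvWFb s.1 s.2.1 s.2.2 ∧ s.1 ≤ n ∧ (b = true ↔ pvSpecExt n Eh Ev s.1 s.2.1)

def pvNoEdge (E : List (Int × Int)) (a : Int) (w : Nat) : Prop :=
  ∀ q : Nat, w.testBit q = true →
    ¬ ∃ p ∈ E, (p.1 = a ∧ p.2 = (q : Int)) ∨ (p.2 = a ∧ p.1 = (q : Int))

lemma pvLandZero (m w : Nat) : ((m &&& w == 0) = true) ↔
    ∀ q, ¬(m.testBit q = true ∧ w.testBit q = true) := by
  rw [beq_iff_eq]
  constructor
  · intro h q ⟨h1, h2⟩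
    have : (m &&& w).testBit q = true := by rw [Nat.testBit_and, h1, h2]; rfl
    rw [h] at this
    exact absurd this (by simp [Nat.zero_testBit])
  · intro h
    apply Nat.eq_of_testBit_eq
    intro q
    rw [Nat.testBit_and, Nat.zero_testBit]
    have := h q
    cases hm : m.testBit q <;> cases hw : w.testBit q <;> simp_all
  
lemma pvEff_mem {nI : Int} {cs : List (Int × Int)} {p : Int × Int} (hp : p ∈ pvEff nI cs) :
    p ∈ cs ∧ 0 ≤ p.1 ∧ p.1 < nI ∧ 0 ≤ p.2 ∧ p.2 < nI ∧ p.1 ≠ p.2 := by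
  simpa [pvEff, List.mem_filter] using hp

lemma pvCanX (cs : List (Int × Int)) (nI : Int) (hpre : ∀ p ∈ cs, 0 ≤ p.1 ∧ 0 ≤ p.2)
    (pos : Nat) (hposn : (pos : Int) < nI) (w : Nat) (hw : ∀ q, w.testBit q = true → q < pos) :
    ((if (pvBuildMask cs).contains ((pos : Nat) : Int)
      then ((pvBuildMask cs).getD ((pos : Nat) : Int) 0 &&& w == 0) else true) = true)
    ↔ pvNoEdge (pvEff nI cs) (pos : Int) w := by
  have hchar := pvBuildMask_spec cs
  have hedge_bit : ∀ q : Nat, (∃ p ∈ pvEff nI cs,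
      (p.1 = (pos : Int) ∧ p.2 = (q : Int)) ∨ (p.2 = (pos : Int) ∧ p.1 = (q : Int))) →
      ((pvBuildMask cs).getD ((pos : Nat) : Int) 0).testBit q = true := by
    intro q ⟨p, hp, hsh⟩
    obtain ⟨hmem, b1, b2, b3, b4, b5⟩ := pvEff_mem hp
    rw [hchar ((pos : Nat) : Int) q]
    rcases hsh with ⟨e1, e2⟩ | ⟨e1, e2⟩
    · exact ⟨p, hmem, Or.inl ⟨e1, by omega⟩⟩
    · exact ⟨p, hmem, Or.inr ⟨e1, by omega⟩⟩
  split
  · rename_i hcont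
    rw [pvLandZero]
    constructor
    · intro h q hq hedge
      exact h q ⟨hedge_bit q hedge, hq⟩
    · rintro h q ⟨hbit, hq⟩
      rcases (hchar ((pos : Nat) : Int) q).1 hbit with ⟨p, hmem, hsh⟩
      have hqpos : q < pos := hw q hq
      obtain ⟨hp1, hp2⟩ := hpre p hmem
      refine h q hq ⟨p, ?_, ?_⟩
      · simp only [pvEff, List.mem_filter, decide_eq_true_eq]
        rcases hsh with ⟨e1, e2⟩ | ⟨e1, e2⟩ <;> exact ⟨hmem, by omega⟩
      · rcases hsh with ⟨e1, e2⟩ | ⟨e1, e2⟩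
        · exact Or.inl ⟨e1, by omega⟩
        · exact Or.inr ⟨e1, by omega⟩
  · rename_i hcont
    simp only [true_iff]
    intro q hq hedge
    have hbit := hedge_bit q hedge
    rw [PySem.Dict.getD_of_not_contains _ _ (by simpa using hcont)] at hbit
    exact absurd hbit (by simp [Nat.zero_testBit])

lemma pvWFb_swap {pos : Nat} {h v : Nat} (hwf : pvWFb pos h v) : pvWFb pos v h := by
  intro q
  obtain ⟨a, b, c, d⟩ := hwf q
  exact ⟨b, a, fun ⟨x, y⟩ => c ⟨y, x⟩, fun hq => (d hq).symm⟩

lemma pvWFb_stepH {pos : Nat} {h v : Nat} (hwf : pvWFb pos h v) :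
    pvWFb (pos + 1) (h ||| 1 <<< pos) v := by
  intro q
  obtain ⟨a, b, c, d⟩ := hwf q
  have hvpos : v.testBit pos = true → False := fun hv => by have := (hwf pos).2.1 hv; omega
  simp only [Nat.testBit_or, pvBitShift, Bool.or_eq_true, decide_eq_true_eq]
  refine ⟨?_, ?_, ?_, ?_⟩
  · rintro (hq | rfl)
    · exact Nat.lt_succ_of_lt (a hq)
    · exact Nat.lt_succ_self _
  · intro hq; exact Nat.lt_succ_of_lt (b hq)
  · rintro ⟨hq | rfl, hv⟩
    · exact c ⟨hq, hv⟩
    · exact hvpos hv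
  · intro hq
    rcases Nat.lt_succ_iff_lt_or_eq.1 hq with h' | rfl
    · rcases d h' with h1 | h1
      · exact Or.inl (Or.inl h1)
      · exact Or.inr h1
    · exact Or.inl (Or.inr rfl)

lemma pvSpec_step (nN : Nat) (hc vc : List (Int × Int)) (pos h v : Nat)
    (hpos : pos < nN) (hwf : pvWFb pos h v) :
    pvSpecExt nN (pvEff nN hc) (pvEff nN vc) pos h ↔
      ((pvNoEdge (pvEff nN hc) (pos : Int) h ∧
        pvSpecExt nN (pvEff nN hc) (pvEff nN vc) (pos + 1) (h ||| 1 <<< pos)) ∨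
       (pvNoEdge (pvEff nN vc) (pos : Int) v ∧
        pvSpecExt nN (pvEff nN hc) (pvEff nN vc) (pos + 1) h)) := by
  have hbit' : ∀ q : Nat, (h ||| 1 <<< pos).testBit q = (h.testBit q || decide (q = pos)) := by
    intro q; rw [Nat.testBit_or, pvBitShift]
  constructor
  · rintro ⟨f, hag, hH, hV⟩
    cases hfp : f ((pos : Nat) : Int)
    · -- vertical at pos
      right
      refine ⟨?_, f, ?_, ?_, ?_⟩
      · intro q hq ⟨p, hp, hsh⟩
        have hqpos : q < pos := (hwf q).2.1 hq
        have hnh : h.testBit q = false := by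
          cases hhb : h.testBit q
          · rfl
          · exact absurd ⟨hhb, hq⟩ (hwf q).2.2.1
        have hfq : f (q : Int) = false := by rw [hag q hqpos, hnh]
        have hmax : (pos : Int) ≤ max p.1 p.2 := by
          rcases hsh with ⟨e1, e2⟩ | ⟨e1, e2⟩ <;> omega
        rcases hsh with ⟨e1, e2⟩ | ⟨e1, e2⟩ <;> rcases hV p hp hmax with hone | hone
        · rw [e1, hfp] at hone; exact absurd hone (by decide)
        · rw [e2, hfq] at hone; exact absurd hone (by decide)
        · rw [e2, hfq] at hone; exact absurd hone (by decide)
        · rw [e1, hfp] at hone; exact absurd hone (by decide)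
      · intro q hq
        rcases Nat.lt_succ_iff_lt_or_eq.1 hq with h' | rfl
        · exact hag q h'
        · have : h.testBit q = false := by
            cases hhb : h.testBit q
            · rfl
            · have := (hwf q).1 hhb; omega
          rw [this, hfp]
      · intro p hp hmax; exact hH p hp (by omega)
      · intro p hp hmax; exact hV p hp (by omega)
    · -- horizontal at pos
      left
      refine ⟨?_, f, ?_, ?_, ?_⟩
      · intro q hq ⟨p, hp, hsh⟩
        have hqpos : q < pos := (hwf q).1 hq
        have hfq : f (q : Int) = true := by rw [hag q hqpos, hq]
        have hmax : (pos : Int) ≤ max p.1 p.2 := by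
          rcases hsh with ⟨e1, e2⟩ | ⟨e1, e2⟩ <;> omega
        refine hH p hp hmax ?_
        rcases hsh with ⟨e1, e2⟩ | ⟨e1, e2⟩ <;> rw [e1, e2] <;> exact ⟨by assumption, by assumption⟩
      · intro q hq
        rw [hbit']
        rcases Nat.lt_succ_iff_lt_or_eq.1 hq with h' | rfl
        · rw [hag q h']
          have : ¬ (q = pos) := by omega
          simp [this]
        · simp [hfp]
      · intro p hp hmax; exact hH p hp (by omega)
      · intro p hp hmax; exact hV p hp (by omega)
  · rintro (⟨hcan, f, hag, hH', hV'⟩ | ⟨hcan, f, hag, hH', hV'⟩)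
    · -- committed horizontal at pos
      have hfp : f ((pos : Nat) : Int) = true := by
        have := hag pos (Nat.lt_succ_self _)
        rw [hbit'] at this
        simpa using this
      refine ⟨f, ?_, ?_, ?_⟩
      · intro q hq
        have := hag q (Nat.lt_succ_of_lt hq)
        rw [hbit'] at this
        have hne : ¬ (q = pos) := by omega
        simpa [hne] using this
      · intro p hp hmax
        obtain ⟨hmem, b1, b2, b3, b4, b5⟩ := pvEff_mem hp
        by_cases hbig : ((pos : Int) + 1) ≤ max p.1 p.2
        · exact hH' p hp (by push_cast; omega)
        · rintro ⟨c1, c2⟩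
          have hcase : (p.1 = (pos : Int) ∧ 0 ≤ p.2 ∧ p.2 < (pos : Int)) ∨
              (p.2 = (pos : Int) ∧ 0 ≤ p.1 ∧ p.1 < (pos : Int)) := by omega
          rcases hcase with ⟨e1, e2, e3⟩ | ⟨e1, e2, e3⟩
          · have hq : p.2 = ((p.2.toNat : Nat) : Int) := by omega
            have hqlt : p.2.toNat < pos := by omega
            have hfq := hag p.2.toNat (Nat.lt_succ_of_lt hqlt)
            rw [hbit'] at hfq
            have hne : ¬ (p.2.toNat = pos) := by omega
            rw [← hq] at hfq
            simp only [hne, decide_false, Bool.or_false] at hfq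
            rw [c2] at hfq
            exact hcan p.2.toNat (by rw [← hfq]) ⟨p, hp, Or.inl ⟨e1, by omega⟩⟩
          · have hq : p.1 = ((p.1.toNat : Nat) : Int) := by omega
            have hqlt : p.1.toNat < pos := by omega
            have hfq := hag p.1.toNat (Nat.lt_succ_of_lt hqlt)
            rw [hbit'] at hfq
            have hne : ¬ (p.1.toNat = pos) := by omega
            rw [← hq] at hfq
            simp only [hne, decide_false, Bool.or_false] at hfq
            rw [c1] at hfq
            exact hcan p.1.toNat (by rw [← hfq]) ⟨p, hp, Or.inr ⟨e1, by omega⟩⟩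
      · intro p hp hmax
        obtain ⟨hmem, b1, b2, b3, b4, b5⟩ := pvEff_mem hp
        by_cases hbig : ((pos : Int) + 1) ≤ max p.1 p.2
        · exact hV' p hp (by push_cast; omega)
        · have hcase : p.1 = (pos : Int) ∨ p.2 = (pos : Int) := by omega
          rcases hcase with e1 | e1
          · exact Or.inl (by rw [e1]; exact hfp)
          · exact Or.inr (by rw [e1]; exact hfp)
    · -- committed vertical at pos
      have hfp : f ((pos : Nat) : Int) = false := by
        have h0 := hag pos (Nat.lt_succ_self _)
        have : h.testBit pos = false := by
          cases hhb : h.testBit pos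
          · rfl
          · have := (hwf pos).1 hhb; omega
        rw [this] at h0; exact h0
      refine ⟨f, ?_, ?_, ?_⟩
      · intro q hq; exact hag q (Nat.lt_succ_of_lt hq)
      · intro p hp hmax
        obtain ⟨hmem, b1, b2, b3, b4, b5⟩ := pvEff_mem hp
        by_cases hbig : ((pos : Int) + 1) ≤ max p.1 p.2
        · exact hH' p hp (by push_cast; omega)
        · rintro ⟨c1, c2⟩
          have hcase : p.1 = (pos : Int) ∨ p.2 = (pos : Int) := by omega
          rcases hcase with e1 | e1
          · rw [e1, hfp] at c1; exact absurd c1 (by decide)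
          · rw [e1, hfp] at c2; exact absurd c2 (by decide)
      · intro p hp hmax
        obtain ⟨hmem, b1, b2, b3, b4, b5⟩ := pvEff_mem hp
        by_cases hbig : ((pos : Int) + 1) ≤ max p.1 p.2
        · exact hV' p hp (by push_cast; omega)
        · have hcase : (p.1 = (pos : Int) ∧ 0 ≤ p.2 ∧ p.2 < (pos : Int)) ∨
              (p.2 = (pos : Int) ∧ 0 ≤ p.1 ∧ p.1 < (pos : Int)) := by omega
          rcases hcase with ⟨e1, e2, e3⟩ | ⟨e1, e2, e3⟩
          · refine Or.inr ?_
            by_contra hc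
            rw [Bool.not_eq_true] at hc
            have hq : p.2 = ((p.2.toNat : Nat) : Int) := by omega
            have hqlt : p.2.toNat < pos := by omega
            have hfq := hag p.2.toNat (Nat.lt_succ_of_lt hqlt)
            rw [← hq, hc] at hfq
            have hvb : v.testBit p.2.toNat = true := by
              rcases (hwf p.2.toNat).2.2.2 hqlt with hb | hb
              · rw [← hfq] at hb; exact absurd hb (by decide)
              · exact hb
            exact hcan p.2.toNat hvb ⟨p, hp, Or.inl ⟨e1, by omega⟩⟩
          · refine Or.inl ?_
            by_contra hc
            rw [Bool.not_eq_true] at hc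
            have hq : p.1 = ((p.1.toNat : Nat) : Int) := by omega
            have hqlt : p.1.toNat < pos := by omega
            have hfq := hag p.1.toNat (Nat.lt_succ_of_lt hqlt)
            rw [← hq, hc] at hfq
            have hvb : v.testBit p.1.toNat = true := by
              rcases (hwf p.1.toNat).2.2.2 hqlt with hb | hb
              · rw [← hfq] at hb; exact absurd hb (by decide)
              · exact hb
            exact hcan p.1.toNat hvb ⟨p, hp, Or.inr ⟨e1, by omega⟩⟩

lemma pvSpecExt_refl (nN : Nat) (hc vc : List (Int × Int)) (h : Nat) :
    pvSpecExt nN (pvEff nN hc) (pvEff nN vc) nN h := by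
  refine ⟨fun z => if 0 ≤ z then h.testBit z.toNat else false, ?_, ?_, ?_⟩
  · intro q hq
    simp
  · intro p hp hmax
    obtain ⟨-, b1, b2, b3, b4, b5⟩ := pvEff_mem hp
    exfalso; omega
  · intro p hp hmax
    obtain ⟨-, b1, b2, b3, b4, b5⟩ := pvEff_mem hp
    exfalso; omega

lemma pvMemoOK_insert {n : Nat} {Eh Ev : List (Int × Int)}
    {memo : PySem.Dict (Nat × Nat × Nat) Bool} (hm : pvMemoOK n Eh Ev memo)
    {s : Nat × Nat × Nat} {b : Bool} (hwf : pvWFb s.1 s.2.1 s.2.2) (hle : s.1 ≤ n)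
    (hb : b = true ↔ pvSpecExt n Eh Ev s.1 s.2.1) :
    pvMemoOK n Eh Ev (memo.insert s b) := by
  intro s' b' hg
  rw [PySem.Dict.get?_insert] at hg
  split at hg
  · rename_i he
    subst he
    cases hg
    exact ⟨hwf, hle, hb⟩
  · exact hm s' b' hg

lemma pvDpA_correct (points : List Int) (hc vc : List (Int × Int))
    (hpre : (∀ p ∈ hc, 0 ≤ p.1 ∧ 0 ≤ p.2) ∧ (∀ p ∈ vc, 0 ≤ p.1 ∧ 0 ≤ p.2)) :
    ∀ fuel pos h v memo, pos ≤ points.length → fuel = points.length - pos →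
    pvWFb pos h v →
    pvMemoOK points.length (pvEff points.length hc) (pvEff points.length vc) memo →
    ((pvDpA points.length (pvBuildMask hc) (pvBuildMask vc) fuel pos h v memo).1 = true ↔
      pvSpecExt points.length (pvEff points.length hc) (pvEff points.length vc) pos h)
    ∧ pvMemoOK points.length (pvEff points.length hc) (pvEff points.length vc)
        (pvDpA points.length (pvBuildMask hc) (pvBuildMask vc) fuel pos h v memo).2 := by
  set nN := points.length with hnN
  intro fuel
  induction fuel with
  | zero =>
    intro pos h v memo hble hfuel hwf hmemo
    have hpos : pos = nN := by omega
    rw [pvDpA, if_pos hpos]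
    subst hpos
    exact ⟨by simpa using pvSpecExt_refl nN hc vc h, hmemo⟩
  | succ fuel ih =>
    intro pos h v memo hble hfuel hwf hmemo
    by_cases hpos : pos = nN
    · rw [pvDpA, if_pos hpos]
      subst hpos
      exact ⟨by simpa using pvSpecExt_refl nN hc vc h, hmemo⟩
    · have hposlt : pos < nN := by omega
      rw [pvDpA, if_neg hpos]
      simp only []
      cases hget : memo.get? (pos, h, v) with
      | some b =>
        obtain ⟨hwf', hle', hiff⟩ := hmemo (pos, h, v) b hget
        exact ⟨hiff, hmemo⟩
      | none =>
        -- the two candidate orientations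
        have hrec := pvSpec_step nN hc vc pos h v hposlt hwf
        have hcanHiff := pvCanX hc (nN : Int) hpre.1 pos (by omega) h (fun q hq => (hwf q).1 hq)
        have hcanViff := pvCanX vc (nN : Int) hpre.2 pos (by omega) v (fun q hq => (hwf q).2.1 hq)
        set canH : Bool :=
          (if (pvBuildMask hc).contains ((pos : Nat) : Int)
           then ((pvBuildMask hc).getD ((pos : Nat) : Int) 0 &&& h == 0) else true) with hcanH
        set canV : Bool :=
          (if (pvBuildMask vc).contains ((pos : Nat) : Int)
           then ((pvBuildMask vc).getD ((pos : Nat) : Int) 0 &&& v == 0) else true) with hcanV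
        have hr1 : ∀ r1 : Bool × PySem.Dict (Nat × Nat × Nat) Bool,
            (r1 = if canH then
                pvDpA nN (pvBuildMask hc) (pvBuildMask vc) fuel (pos + 1) (h ||| 1 <<< pos) v memo
              else (false, memo)) →
            (r1.1 = true ↔ (canH = true ∧
              pvSpecExt nN (pvEff nN hc) (pvEff nN vc) (pos + 1) (h ||| 1 <<< pos))) ∧
            pvMemoOK nN (pvEff nN hc) (pvEff nN vc) r1.2 := by
          intro r1 hdef
          cases hcH : canH
          · rw [hcH] at hdef
            simp only [Bool.false_eq_true, if_false] at hdef
            subst hdef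
            exact ⟨by simp, hmemo⟩
          · rw [hcH] at hdef
            simp only [if_true] at hdef
            subst hdef
            have := ih (pos + 1) (h ||| 1 <<< pos) v memo (by omega) (by omega)
              (pvWFb_stepH hwf) hmemo
            exact ⟨by rw [this.1]; simp, this.2⟩
        have hr2 : ∀ (memo' : PySem.Dict (Nat × Nat × Nat) Bool),
            pvMemoOK nN (pvEff nN hc) (pvEff nN vc) memo' →
            ∀ r2 : Bool × PySem.Dict (Nat × Nat × Nat) Bool,
            (r2 = if canV then
                pvDpA nN (pvBuildMask hc) (pvBuildMask vc) fuel (pos + 1) h (v ||| 1 <<< pos) memo'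
              else (false, memo')) →
            (r2.1 = true ↔ (canV = true ∧
              pvSpecExt nN (pvEff nN hc) (pvEff nN vc) (pos + 1) h)) ∧
            pvMemoOK nN (pvEff nN hc) (pvEff nN vc) r2.2 := by
          intro memo' hmemo' r2 hdef
          cases hcV : canV
          · rw [hcV] at hdef
            simp only [Bool.false_eq_true, if_false] at hdef
            subst hdef
            exact ⟨by simp, hmemo'⟩
          · rw [hcV] at hdef
            simp only [if_true] at hdef
            subst hdef
            have hwf2 : pvWFb (pos + 1) h (v ||| 1 <<< pos) :=
              pvWFb_swap (pvWFb_stepH (pvWFb_swap hwf))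
            have := ih (pos + 1) h (v ||| 1 <<< pos) memo' (by omega) (by omega) hwf2 hmemo'
            exact ⟨by rw [this.1]; simp, this.2⟩
        obtain ⟨h1iff, h1memo⟩ := hr1 _ rfl
        set r1 := if canH then
            pvDpA nN (pvBuildMask hc) (pvBuildMask vc) fuel (pos + 1) (h ||| 1 <<< pos) v memo
          else (false, memo) with hr1def
        have hspec_of_r1 : r1.1 = true → pvSpecExt nN (pvEff nN hc) (pvEff nN vc) pos h := by
          intro hb
          obtain ⟨hcH, hs⟩ := h1iff.1 hb
          exact hrec.2 (Or.inl ⟨hcanHiff.1 hcH, hs⟩)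
        cases hb1 : r1.1
        · obtain ⟨h2iff, h2memo⟩ := hr2 r1.2 h1memo _ rfl
          set r2 := if canV then
              pvDpA nN (pvBuildMask hc) (pvBuildMask vc) fuel (pos + 1) h (v ||| 1 <<< pos) r1.2
            else (false, r1.2) with hr2def
          have hspec_of_r2 : r2.1 = true → pvSpecExt nN (pvEff nN hc) (pvEff nN vc) pos h := by
            intro hb
            obtain ⟨hcV, hs⟩ := h2iff.1 hb
            exact hrec.2 (Or.inr ⟨hcanViff.1 hcV, hs⟩)
          cases hb2 : r2.1
          · -- both fail: result false, Spec must fail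
            simp only [hb1, hb2, Bool.false_eq_true, if_false]
            refine ⟨?_, pvMemoOK_insert h2memo hwf (by omega) ?_⟩
            · simp only [Bool.false_eq_true, false_iff]
              intro hs
              rcases hrec.1 hs with ⟨hne, hs'⟩ | ⟨hne, hs'⟩
              · have : r1.1 = true := h1iff.2 ⟨hcanHiff.2 hne, hs'⟩
                rw [hb1] at this; exact absurd this (by decide)
              · have : r2.1 = true := h2iff.2 ⟨hcanViff.2 hne, hs'⟩
                rw [hb2] at this; exact absurd this (by decide)
            · simp only [Bool.false_eq_true, false_iff]
              intro hs
              rcases hrec.1 hs with ⟨hne, hs'⟩ | ⟨hne, hs'⟩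
              · have : r1.1 = true := h1iff.2 ⟨hcanHiff.2 hne, hs'⟩
                rw [hb1] at this; exact absurd this (by decide)
              · have : r2.1 = true := h2iff.2 ⟨hcanViff.2 hne, hs'⟩
                rw [hb2] at this; exact absurd this (by decide)
          · -- vertical succeeded
            simp only [hb1, hb2, Bool.false_eq_true, if_false, if_true]
            exact ⟨by simp [hspec_of_r2 hb2],
              pvMemoOK_insert h2memo hwf (by omega) (by simp [hspec_of_r2 hb2])⟩
        · -- horizontal succeeded
          simp only [hb1, if_true]
          exact ⟨by simp [hspec_of_r1 hb1],
            pvMemoOK_insert h1memo hwf (by omega) (by simp [hspec_of_r1 hb1])⟩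

lemma pvA_iff_sat (points : List Int) (k : Int) (hc vc : List (Int × Int))
    (hpre : Pre_can_place_fries_exact_dp points k hc vc) :
    can_place_fries_exact_dp points k hc vc = true ↔ pvSat points.length hc vc := by
  have hwf0 : pvWFb 0 0 0 := by
    intro q
    refine ⟨fun hb => ?_, fun hb => ?_, fun hb => ?_, fun hq => ?_⟩
    · rw [Nat.zero_testBit] at hb; cases hb
    · rw [Nat.zero_testBit] at hb; cases hb
    · rw [Nat.zero_testBit] at hb; exact absurd hb.1 (by decide)
    · omega
  have hmemo0 : pvMemoOK points.length (pvEff points.length hc) (pvEff points.length vc)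
      PySem.Dict.empty := by
    intro s b hg
    rw [PySem.Dict.get?_empty] at hg
    cases hg
  have hmain := (pvDpA_correct points hc vc hpre points.length 0 0 0 PySem.Dict.empty
    (by omega) (by omega) hwf0 hmemo0).1
  unfold can_place_fries_exact_dp
  simp only []
  rw [hmain]
  constructor
  · rintro ⟨f, hag, hH, hV⟩
    refine ⟨f, fun p hp => hH p hp ?_, fun p hp => hV p hp ?_⟩ <;>
      · obtain ⟨-, b1, b2, b3, b4, b5⟩ := pvEff_mem hp
        omega
  · rintro ⟨f, sH, sV⟩
    exact ⟨f, fun q hq => absurd hq (by omega), fun p hp _ => sH p hp, fun p hp _ => sV p hp⟩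

-- ---------- B side ----------

-- one implication edge of the 2-SAT graph, literal-coded (2i = i horizontal, 2i+1 = i vertical)
def pvStep (n : Int) (hc vc : List (Int × Int)) (l m : Int) : Prop :=
  (∃ p ∈ pvEff n hc, (l = 2 * p.1 ∧ m = 2 * p.2 + 1) ∨ (l = 2 * p.2 ∧ m = 2 * p.1 + 1)) ∨
  (∃ p ∈ pvEff n vc, (l = 2 * p.1 + 1 ∧ m = 2 * p.2) ∨ (l = 2 * p.2 + 1 ∧ m = 2 * p.1))

def pvReach (n : Int) (hc vc : List (Int × Int)) : Int → Int → Prop :=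
  Relation.ReflTransGen (pvStep n hc vc)

lemma pvStep_bounds {n : Int} {hc vc : List (Int × Int)} {l m : Int} (h : pvStep n hc vc l m) :
    (0 ≤ l ∧ l < 2 * n) ∧ (0 ≤ m ∧ m < 2 * n) := by
  rcases h with ⟨p, hp, hca⟩ | ⟨p, hp, hca⟩ <;>
  · simp only [pvEff, List.mem_filter, decide_eq_true_eq] at hp
    rcases hca with ⟨h1, h2⟩ | ⟨h1, h2⟩ <;> omega

lemma pvAdjAdd_len (n : Int) (horiz : Bool) (adj : List (List Int)) (p : Int × Int) :
    (pvAdjAdd n horiz adj p).length = adj.length := by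
  unfold pvAdjAdd
  split
  · split <;> simp [PySem.List.length_pySetD]
  · rfl

lemma pvMemSetGet (n : Int) (adj : List (List Int)) (i l : Int) (v : List Int)
    (hlen : adj.length = (2 * n).toNat) (hi : 0 ≤ i) (hi2 : i < 2 * n)
    (hl : 0 ≤ l) (hl2 : l < 2 * n) (m : Int) :
    m ∈ PySem.List.pyGetD (PySem.List.pySetD adj i v) l [] ↔
      (if l = i then m ∈ v else m ∈ PySem.List.pyGetD adj l []) := by
  rw [PySem.List.pySetD_of_nonneg _ _ hi, PySem.List.pyGetD_of_nonneg _ _ hl,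
      PySem.List.pyGetD_of_nonneg _ _ hl]
  rcases eq_or_ne l i with rfl | hne
  · rw [if_pos rfl, List.getD_eq_getElem _ _ (by simp [hlen]; omega),
        List.getElem_set_self (h := by simp [hlen]; omega)]
  · rw [if_neg hne, List.getD_eq_getElem _ _ (by simp [hlen]; omega),
        List.getElem_set_ne (h := by omega) (hj := by simp [hlen]; omega),
        ← List.getD_eq_getElem _ _ (by omega)]

lemma pvAdjAdd_char (n : Int) (horiz : Bool) (adj : List (List Int)) (p : Int × Int)
    (hlen : adj.length = (2 * n).toNat) {l : Int} (hl : 0 ≤ l) (hl2 : l < 2 * n) (m : Int) :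
    m ∈ PySem.List.pyGetD (pvAdjAdd n horiz adj p) l [] ↔
      m ∈ PySem.List.pyGetD adj l [] ∨
        ((0 ≤ p.1 ∧ p.1 < n ∧ 0 ≤ p.2 ∧ p.2 < n ∧ p.1 ≠ p.2) ∧
          (if horiz then (l = 2 * p.1 ∧ m = 2 * p.2 + 1) ∨ (l = 2 * p.2 ∧ m = 2 * p.1 + 1)
           else (l = 2 * p.1 + 1 ∧ m = 2 * p.2) ∨ (l = 2 * p.2 + 1 ∧ m = 2 * p.1))) := by
  unfold pvAdjAdd
  split
  · rename_i hok
    cases horiz <;> simp only [Bool.false_eq_true, if_true, if_false, cond_true, cond_false]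
    · -- vertical pair: updates at 2 p.1 + 1 then 2 p.2 + 1
      rw [pvMemSetGet n _ _ _ _ (by rw [PySem.List.length_pySetD]; exact hlen)
            (by omega) (by omega) hl hl2]
      split_ifs with hcase
      · rw [List.mem_append,
            pvMemSetGet n adj _ _ _ hlen (by omega) (by omega) (by omega) (by omega),
            if_neg (by omega)]
        simp only [List.mem_singleton]
        constructor
        · rintro (h | h)
          · exact Or.inl (by rw [hcase]; exact h)
          · exact Or.inr ⟨hok, Or.inr ⟨hcase, h⟩⟩
        · rintro (h | ⟨-, (⟨h1, h2⟩ | ⟨h1, h2⟩)⟩)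
          · rw [hcase] at h; exact Or.inl h
          · exfalso; omega
          · exact Or.inr h2
      · rw [pvMemSetGet n adj _ _ _ hlen (by omega) (by omega) hl hl2]
        split_ifs with hcase2
        · rw [List.mem_append]
          simp only [List.mem_singleton]
          constructor
          · rintro (h | h)
            · exact Or.inl (by rw [hcase2]; exact h)
            · exact Or.inr ⟨hok, Or.inl ⟨hcase2, h⟩⟩
          · rintro (h | ⟨-, (⟨h1, h2⟩ | ⟨h1, h2⟩)⟩)
            · rw [hcase2] at h; exact Or.inl h
            · exact Or.inr h2
            · exfalso; exact hcase h1
        · constructor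
          · exact Or.inl
          · rintro (h | ⟨-, (⟨h1, h2⟩ | ⟨h1, h2⟩)⟩)
            · exact h
            · exact absurd h1 hcase2
            · exact absurd h1 hcase
    · -- horizontal pair: updates at 2 p.1 then 2 p.2
      rw [pvMemSetGet n _ _ _ _ (by rw [PySem.List.length_pySetD]; exact hlen)
            (by omega) (by omega) hl hl2]
      split_ifs with hcase
      · rw [List.mem_append,
            pvMemSetGet n adj _ _ _ hlen (by omega) (by omega) (by omega) (by omega),
            if_neg (by omega)]
        simp only [List.mem_singleton]
        constructor
        · rintro (h | h)
          · exact Or.inl (by rw [hcase]; exact h)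
          · exact Or.inr ⟨hok, Or.inr ⟨hcase, h⟩⟩
        · rintro (h | ⟨-, (⟨h1, h2⟩ | ⟨h1, h2⟩)⟩)
          · rw [hcase] at h; exact Or.inl h
          · exfalso; omega
          · exact Or.inr h2
      · rw [pvMemSetGet n adj _ _ _ hlen (by omega) (by omega) hl hl2]
        split_ifs with hcase2
        · rw [List.mem_append]
          simp only [List.mem_singleton]
          constructor
          · rintro (h | h)
            · exact Or.inl (by rw [hcase2]; exact h)
            · exact Or.inr ⟨hok, Or.inl ⟨hcase2, h⟩⟩
          · rintro (h | ⟨-, (⟨h1, h2⟩ | ⟨h1, h2⟩)⟩)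
            · rw [hcase2] at h; exact Or.inl h
            · exact Or.inr h2
            · exfalso; exact hcase h1
        · constructor
          · exact Or.inl
          · rintro (h | ⟨-, (⟨h1, h2⟩ | ⟨h1, h2⟩)⟩)
            · exact h
            · exact absurd h1 hcase2
            · exact absurd h1 hcase
  · rename_i hbad
    constructor
    · exact Or.inl
    · rintro (h | ⟨hok, -⟩)
      · exact h
      · exact absurd hok hbad

lemma pvFold_len (n : Int) (horiz : Bool) :
    ∀ (cs : List (Int × Int)) (adj : List (List Int)),
      (cs.foldl (pvAdjAdd n horiz) adj).length = adj.length := by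
  intro cs
  induction cs with
  | nil => intro adj; rfl
  | cons p rest ih => intro adj; rw [List.foldl_cons, ih, pvAdjAdd_len]

lemma pvFold_char (n : Int) (horiz : Bool) :
    ∀ (cs : List (Int × Int)) (adj : List (List Int)),
      adj.length = (2 * n).toNat → ∀ {l : Int}, 0 ≤ l → l < 2 * n → ∀ m,
      (m ∈ PySem.List.pyGetD (cs.foldl (pvAdjAdd n horiz) adj) l [] ↔
        m ∈ PySem.List.pyGetD adj l [] ∨
          ∃ p ∈ cs, (0 ≤ p.1 ∧ p.1 < n ∧ 0 ≤ p.2 ∧ p.2 < n ∧ p.1 ≠ p.2) ∧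
            (if horiz then (l = 2 * p.1 ∧ m = 2 * p.2 + 1) ∨ (l = 2 * p.2 ∧ m = 2 * p.1 + 1)
             else (l = 2 * p.1 + 1 ∧ m = 2 * p.2) ∨ (l = 2 * p.2 + 1 ∧ m = 2 * p.1))) := by
  intro cs
  induction cs with
  | nil => intro adj _ l hl hl2 m; simp
  | cons p rest ih =>
    intro adj hlen l hl hl2 m
    rw [List.foldl_cons, ih _ (by rw [pvAdjAdd_len]; exact hlen) hl hl2 m]
    rw [pvAdjAdd_char n horiz adj p hlen hl hl2 m]
    simp only [List.mem_cons]
    constructor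
    · rintro ((h | h) | ⟨q, hq, hrest⟩)
      · exact Or.inl h
      · exact Or.inr ⟨p, Or.inl rfl, h⟩
      · exact Or.inr ⟨q, Or.inr hq, hrest⟩
    · rintro (h | ⟨q, (rfl | hq), hrest⟩)
      · exact Or.inl (Or.inl h)
      · exact Or.inl (Or.inr hrest)
      · exact Or.inr ⟨q, hq, hrest⟩

lemma pvAdjB_get (n : Int) (hc vc : List (Int × Int)) (hn : 0 ≤ n) {l : Int}
    (hl : 0 ≤ l) (hl2 : l < 2 * n) :
    ∀ m, m ∈ PySem.List.pyGetD (pvAdjB n hc vc) l [] ↔ pvStep n hc vc l m := by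
  intro m
  have hbase : ∀ m', m' ∈ PySem.List.pyGetD ((PySem.List.pyRange 0 (2 * n) 1).map (fun _ => ([] : List Int))) l [] ↔ False := by
    intro m'
    rw [PySem.List.pyGetD_map_pyRange_of_nonneg _ _ _ _ hl hl2]
    simp
  unfold pvAdjB
  rw [pvFold_char n false vc _ (by rw [pvFold_len]; simp [PySem.List.length_pyRange_one]) hl hl2 m]
  rw [pvFold_char n true hc _ (by simp [PySem.List.length_pyRange_one]) hl hl2 m]
  rw [hbase m]
  simp only [if_true, if_false, Bool.false_eq_true, false_or]
  unfold pvStep pvEff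
  simp only [List.mem_filter, decide_eq_true_eq, and_assoc]

lemma pvClosLoop_succ (adj : List (List Int)) (fuel : Nat) (vis : PySem.Set Int) :
    pvClosLoop adj (fuel + 1) vis =
      if (PySem.Set.union vis (PySem.Set.ofList (vis.flatMap (fun u => PySem.List.pyGetD adj u [])))).length = vis.length
      then vis
      else pvClosLoop adj fuel (PySem.Set.union vis (PySem.Set.ofList (vis.flatMap (fun u => PySem.List.pyGetD adj u [])))) := rfl

lemma pvClosLoop_spec (n : Int) (hc vc : List (Int × Int)) (hn : 0 ≤ n) (s : Int) :
    ∀ (fuel : Nat) (vis : PySem.Set Int), vis.Nodup → s ∈ vis →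
      (∀ m ∈ vis, pvReach n hc vc s m ∧ 0 ≤ m ∧ m < 2 * n) →
      (2 * n).toNat + 1 ≤ vis.length + fuel →
      (pvClosLoop (pvAdjB n hc vc) fuel vis).Nodup ∧
      s ∈ pvClosLoop (pvAdjB n hc vc) fuel vis ∧
      (∀ m ∈ pvClosLoop (pvAdjB n hc vc) fuel vis, pvReach n hc vc s m ∧ 0 ≤ m ∧ m < 2 * n) ∧
      (∀ u ∈ pvClosLoop (pvAdjB n hc vc) fuel vis, ∀ m, pvStep n hc vc u m →
        m ∈ pvClosLoop (pvAdjB n hc vc) fuel vis) := by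
  intro fuel
  induction fuel with
  | zero =>
    intro vis hnd hsv hinv hbound
    exfalso
    have hsub : vis ⊆ PySem.List.pyRange 0 (2 * n) 1 := by
      intro m hm
      exact PySem.List.mem_pyRange_one.2 ⟨(hinv m hm).2.1, (hinv m hm).2.2⟩
    have := (List.subperm_of_subset hnd hsub).length_le
    rw [PySem.List.length_pyRange_one] at this
    omega
  | succ fuel ih =>
    intro vis hnd hsv hinv hbound
    rw [pvClosLoop_succ]
    set nxt := PySem.Set.union vis (PySem.Set.ofList (vis.flatMap (fun u => PySem.List.pyGetD (pvAdjB n hc vc) u []))) with hnxt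
    have hmemnxt : ∀ x, x ∈ nxt ↔ x ∈ vis ∨ ∃ u ∈ vis, pvStep n hc vc u x := by
      intro x
      rw [hnxt, PySem.Set.mem_union, PySem.Set.mem_ofList, List.mem_flatMap]
      constructor
      · rintro (h | ⟨u, hu, hx⟩)
        · exact Or.inl h
        · exact Or.inr ⟨u, hu, (pvAdjB_get n hc vc hn (hinv u hu).2.1 (hinv u hu).2.2 x).1 hx⟩
      · rintro (h | ⟨u, hu, hx⟩)
        · exact Or.inl h
        · exact Or.inr ⟨u, hu, (pvAdjB_get n hc vc hn (hinv u hu).2.1 (hinv u hu).2.2 x).2 hx⟩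
    have hpref : vis <+: nxt :=
      ⟨_, (PySem.Set.update_eq_append_filter _ _).symm⟩
    split_ifs with hlen
    · have heq : vis = nxt := hpref.eq_of_length hlen.symm
      refine ⟨hnd, hsv, hinv, ?_⟩
      intro u hu m hstep
      have hm : m ∈ nxt := (hmemnxt m).2 (Or.inr ⟨u, hu, hstep⟩)
      rwa [← heq] at hm
    · have hndn : nxt.Nodup := PySem.Set.nodup_union _ _ hnd
      have hgrow : vis.length ≤ nxt.length := hpref.length_le
      have hinvn : ∀ m ∈ nxt, pvReach n hc vc s m ∧ 0 ≤ m ∧ m < 2 * n := by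
        intro m hm
        rcases (hmemnxt m).1 hm with h | ⟨u, hu, hstep⟩
        · exact hinv m h
        · exact ⟨(hinv u hu).1.tail hstep, (pvStep_bounds hstep).2⟩
      exact ih nxt hndn ((hmemnxt s).2 (Or.inl hsv)) hinvn (by omega)

lemma pvClosure_mem (n : Int) (hc vc : List (Int × Int)) (hn : 0 ≤ n) {s : Int}
    (hs : 0 ≤ s) (hs2 : s < 2 * n) :
    ∀ t, t ∈ pvClosure n (pvAdjB n hc vc) s ↔ pvReach n hc vc s t := by
  have hspec := pvClosLoop_spec n hc vc hn s (2 * n).toNat [s]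
    (List.nodup_singleton s) (List.mem_singleton_self s)
    (by intro m hm
        rw [List.mem_singleton] at hm
        subst hm
        exact ⟨Relation.ReflTransGen.refl, hs, hs2⟩)
    (by simp)
  obtain ⟨hnd, hsv, hmem, hclosed⟩ := hspec
  intro t
  constructor
  · intro ht
    exact (hmem t ht).1
  · intro ht
    induction ht with
    | refl => exact hsv
    | tail hr hstep ih => exact hclosed _ ih _ hstep

-- ---------- 2-SAT feasibility (Aspvall–Plass–Tarjan) ----------

-- skew symmetry of the reflexive-transitive closure of any skew-symmetric relation on literals
lemma pvRT_skew {S : Int × Bool → Int × Bool → Prop}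
    (hsk : ∀ a b, S a b → S (b.1, !b.2) (a.1, !a.2)) {a b : Int × Bool}
    (h : Relation.ReflTransGen S a b) :
    Relation.ReflTransGen S (b.1, !b.2) (a.1, !a.2) := by
  induction h with
  | refl => exact Relation.ReflTransGen.refl
  | tail _ hstep ih => exact Relation.ReflTransGen.head (hsk _ _ hstep) ih

-- if no variable of A reaches its own negation in both directions, the implications
-- whose endpoints both lie in A can be jointly satisfied
set_option maxHeartbeats 1000000 in
theorem pvAPT (S : Int × Bool → Int × Bool → Prop)
    (hsk : ∀ a b, S a b → S (b.1, !b.2) (a.1, !a.2)) :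
    ∀ (A : Finset Int),
      (∀ x ∈ A, ¬(Relation.ReflTransGen S (x, true) (x, false) ∧
                  Relation.ReflTransGen S (x, false) (x, true))) →
      ∃ f : Int → Bool, ∀ a b, S a b → a.1 ∈ A → b.1 ∈ A → f a.1 = a.2 → f b.1 = b.2 := by
  classical
  intro A
  induction A using Finset.strongInduction with
  | _ A ih =>
    intro hA
    by_cases hA0 : A = ∅
    · subst hA0
      exact ⟨fun _ => false, by intro a b _ ha _ _; exact absurd ha (Finset.notMem_empty _)⟩
    obtain ⟨x, hx⟩ := Finset.nonempty_iff_ne_empty.2 hA0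
    -- pick the orientation of x that does not reach its own negation
    set l0 : Int × Bool :=
      if Relation.ReflTransGen S (x, true) (x, false) then (x, false) else (x, true) with hl0
    have hno : ¬ Relation.ReflTransGen S l0 (l0.1, !l0.2) := by
      by_cases hc : Relation.ReflTransGen S (x, true) (x, false)
      · simp only [hl0, if_pos hc]
        intro h2; exact hA x hx ⟨hc, by simpa using h2⟩
      · simp only [hl0, if_neg hc]
        intro h2; exact hc (by simpa using h2)
    -- the down-set of l0 never contains a literal and its negation
    have hcons : ∀ m, Relation.ReflTransGen S l0 m → ¬ Relation.ReflTransGen S l0 (m.1, !m.2) := by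
      intro m h1 h2
      have h3 := pvRT_skew hsk h2
      simp only [Bool.not_not] at h3
      exact hno (h1.trans h3)
    set Tv : Finset Int := A.filter (fun y => Relation.ReflTransGen S l0 (y, true) ∨ Relation.ReflTransGen S l0 (y, false)) with hTv
    have hxT : x ∈ Tv := by
      refine Finset.mem_filter.2 ⟨hx, ?_⟩
      by_cases hc : Relation.ReflTransGen S (x, true) (x, false)
      · right; simp only [hl0, if_pos hc]; exact Relation.ReflTransGen.refl
      · left; simp only [hl0, if_neg hc]; exact Relation.ReflTransGen.refl
    have hss : A \ Tv ⊂ A :=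
      Finset.sdiff_ssubset (Finset.filter_subset _ _) ⟨x, hxT⟩
    obtain ⟨f', hf'⟩ := ih (A \ Tv) hss (fun y hy => hA y (Finset.mem_sdiff.1 hy).1)
    refine ⟨fun y => if Relation.ReflTransGen S l0 (y, true) then true
                     else if Relation.ReflTransGen S l0 (y, false) then false else f' y, ?_⟩
    have hTtrue : ∀ m : Int × Bool, Relation.ReflTransGen S l0 m →
        (if Relation.ReflTransGen S l0 (m.1, true) then true
         else if Relation.ReflTransGen S l0 (m.1, false) then false else f' m.1) = m.2 := by
      intro m hm
      cases hm2 : m.2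
      · have hmeq : (m.1, false) = m := by rw [← hm2]
        have hnot : ¬ Relation.ReflTransGen S l0 (m.1, true) := by
          have := hcons m hm; rw [hm2] at this; simpa using this
        rw [if_neg hnot, if_pos (hmeq ▸ hm)]
      · have hmeq : (m.1, true) = m := by rw [← hm2]
        rw [if_pos (hmeq ▸ hm)]
    have hout : ∀ m : Int × Bool, ¬ Relation.ReflTransGen S l0 (m.1, m.2) →
        ¬ Relation.ReflTransGen S l0 (m.1, !m.2) →
        (if Relation.ReflTransGen S l0 (m.1, true) then true
         else if Relation.ReflTransGen S l0 (m.1, false) then false else f' m.1) = f' m.1 := by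
      intro m h1 h2
      have hcT : ¬ Relation.ReflTransGen S l0 (m.1, true) := by
        cases hm2 : m.2 <;> rw [hm2] at h1 h2 <;> simp_all
      have hcF : ¬ Relation.ReflTransGen S l0 (m.1, false) := by
        cases hm2 : m.2 <;> rw [hm2] at h1 h2 <;> simp_all
      rw [if_neg hcT, if_neg hcF]
    intro a b hs ha hb hfa
    have hfa2 : (if Relation.ReflTransGen S l0 (a.1, true) then true
                 else if Relation.ReflTransGen S l0 (a.1, false) then false else f' a.1) = a.2 := hfa
    by_cases haT : Relation.ReflTransGen S l0 (a.1, a.2)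
    · exact hTtrue b (Relation.ReflTransGen.tail haT hs)
    by_cases haT' : Relation.ReflTransGen S l0 (a.1, !a.2)
    · have h1 := hTtrue (a.1, !a.2) haT'
      simp only at h1
      rw [hfa2] at h1
      cases a.2 <;> simp at h1
    by_cases hbT : Relation.ReflTransGen S l0 (b.1, b.2)
    · exact hTtrue b hbT
    by_cases hbT' : Relation.ReflTransGen S l0 (b.1, !b.2)
    · exact absurd (Relation.ReflTransGen.tail hbT' (hsk a b hs)) haT'
    -- both endpoints untouched: defer to the smaller instance
    have hmemv : ∀ (m : Int × Bool), ¬ Relation.ReflTransGen S l0 (m.1, m.2) →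
        ¬ Relation.ReflTransGen S l0 (m.1, !m.2) → m.1 ∈ A → m.1 ∈ A \ Tv := by
      intro m h1 h2 hmA
      refine Finset.mem_sdiff.2 ⟨hmA, fun hmT => ?_⟩
      rcases Finset.mem_filter.1 hmT with ⟨-, hc | hc⟩ <;>
        cases hm2 : m.2 <;> rw [hm2] at h1 h2 <;>
        simp only [Bool.not_false, Bool.not_true] at h2 <;>
        first | exact h1 hc | exact h2 hc
    have ha' := hmemv a haT haT' ha
    have hb' := hmemv b hbT hbT' hb
    have hfa' : f' a.1 = a.2 := by rw [hout a haT haT'] at hfa2; exact hfa2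
    have hres := hf' a b hs ha' hb' hfa'
    show (if Relation.ReflTransGen S l0 (b.1, true) then true
          else if Relation.ReflTransGen S l0 (b.1, false) then false else f' b.1) = b.2
    rw [hout b hbT hbT']
    exact hres

-- pair view of the literal-coded step relation
def pvEnc (a : Int × Bool) : Int := 2 * a.1 + (if a.2 then 0 else 1)

def pvSPair (n : Int) (hc vc : List (Int × Int)) (a b : Int × Bool) : Prop :=
  pvStep n hc vc (pvEnc a) (pvEnc b)

lemma pvSPair_skew (n : Int) (hc vc : List (Int × Int)) :
    ∀ a b, pvSPair n hc vc a b → pvSPair n hc vc (b.1, !b.2) (a.1, !a.2) := by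
  rintro ⟨x, c⟩ ⟨y, d⟩ h
  rcases h with ⟨p, hp, hca⟩ | ⟨p, hp, hca⟩
  · -- h edge: implications 2p1 → 2p2+1 and 2p2 → 2p1+1 are mutually skew
    rcases hca with ⟨h1, h2⟩ | ⟨h1, h2⟩ <;>
    · simp only [pvSPair, pvEnc] at *
      left; refine ⟨p, hp, ?_⟩
      cases c <;> cases d <;> simp_all <;> omega
  · rcases hca with ⟨h1, h2⟩ | ⟨h1, h2⟩ <;>
    · simp only [pvSPair, pvEnc] at *
      right; refine ⟨p, hp, ?_⟩
      cases c <;> cases d <;> simp_all <;> omega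

lemma pvReach_iff_RT (n : Int) (hc vc : List (Int × Int)) (a b : Int × Bool) :
    pvReach n hc vc (pvEnc a) (pvEnc b) ↔
      Relation.ReflTransGen (pvSPair n hc vc) a b := by
  have hdec : ∀ c : Int, pvEnc (c / 2, c % 2 == 0) = c := by
    intro c
    rcases Int.emod_two_eq_zero_or_one c with h2 | h2 <;>
      simp only [pvEnc, h2] <;> norm_num <;> omega
  have hinj : ∀ x y : Int × Bool, pvEnc x = pvEnc y → x = y := by
    rintro ⟨x, c⟩ ⟨y, d⟩ h
    simp only [pvEnc] at h
    cases c <;> cases d <;> simp_all <;> omega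
  constructor
  · intro h
    have key : ∀ t, pvReach n hc vc (pvEnc a) t →
        ∃ b' : Int × Bool, t = pvEnc b' ∧ Relation.ReflTransGen (pvSPair n hc vc) a b' := by
      intro t ht
      induction ht with
      | refl => exact ⟨a, rfl, Relation.ReflTransGen.refl⟩
      | tail _ hstep ih =>
        rcases ih with ⟨b', rfl, hrt⟩
        rename_i c _
        refine ⟨(c / 2, c % 2 == 0), (hdec c).symm, hrt.tail ?_⟩
        simpa [pvSPair, hdec c] using hstep
    rcases key _ h with ⟨b', hb, hrt⟩
    rwa [hinj _ _ hb]
  · intro h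
    induction h with
    | refl => exact Relation.ReflTransGen.refl
    | tail _ hstep ih => exact ih.tail hstep

lemma pvSat_iff_resp (n : Int) (hc vc : List (Int × Int)) :
    pvSat n hc vc ↔
      ∃ f : Int → Bool, ∀ a b, pvSPair n hc vc a b → f a.1 = a.2 → f b.1 = b.2 := by
  constructor
  · rintro ⟨f, hH, hV⟩
    refine ⟨f, ?_⟩
    rintro ⟨x, c⟩ ⟨y, d⟩ hs hfx
    rcases hs with ⟨p, hp, hca⟩ | ⟨p, hp, hca⟩
    · have hij := hH p hp
      rcases hca with ⟨h1, h2⟩ | ⟨h1, h2⟩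
      · cases c <;> cases d <;> norm_num [pvEnc] at h1 h2 <;>
          first
            | (exfalso; omega)
            | (have hx : x = p.1 := by omega
               have hy : y = p.2 := by omega
               subst hx; subst hy
               cases hv : f p.2
               · rfl
               · exact absurd ⟨hfx, hv⟩ hij)
      · cases c <;> cases d <;> norm_num [pvEnc] at h1 h2 <;>
          first
            | (exfalso; omega)
            | (have hx : x = p.2 := by omega
               have hy : y = p.1 := by omega
               subst hx; subst hy
               cases hv : f p.1
               · rfl
               · exact absurd ⟨hv, hfx⟩ hij)
    · have hij := hV p hp
      rcases hca with ⟨h1, h2⟩ | ⟨h1, h2⟩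
      · cases c <;> cases d <;> norm_num [pvEnc] at h1 h2 <;>
          first
            | (exfalso; omega)
            | (have hx : x = p.1 := by omega
               have hy : y = p.2 := by omega
               subst hx; subst hy
               rcases hij with h | h
               · simp_all
               · exact h)
      · cases c <;> cases d <;> norm_num [pvEnc] at h1 h2 <;>
          first
            | (exfalso; omega)
            | (have hx : x = p.2 := by omega
               have hy : y = p.1 := by omega
               subst hx; subst hy
               rcases hij with h | h
               · exact h
               · simp_all)
  · rintro ⟨f, hf⟩
    refine ⟨f, ?_, ?_⟩
    · intro p hp hcon
      have hs : pvSPair n hc vc (p.1, true) (p.2, false) := by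
        left; exact ⟨p, hp, Or.inl (by simp [pvEnc])⟩
      have := hf _ _ hs (by simpa using hcon.1)
      simp at this; simp_all
    · intro p hp
      by_contra hcon
      rw [not_or] at hcon
      have hs : pvSPair n hc vc (p.1, false) (p.2, true) := by
        right; exact ⟨p, hp, Or.inl (by simp [pvEnc])⟩
      have := hf _ _ hs (by simp [hcon.1])
      simp at this; simp_all

lemma pvSPair_vars {n : Int} {hc vc : List (Int × Int)} {a b : Int × Bool}
    (h : pvSPair n hc vc a b) :
    a.1 ∈ Finset.Icc 0 (n - 1) ∧ b.1 ∈ Finset.Icc 0 (n - 1) := by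
  have hb := pvStep_bounds h
  simp only [pvEnc] at hb
  constructor <;> rw [Finset.mem_Icc] <;>
    [rcases hb.1 with ⟨h1, h2⟩; rcases hb.2 with ⟨h1, h2⟩] <;>
    [cases a.2; cases b.2] <;> simp_all <;> omega

lemma pvRT_preserve {n : Int} {hc vc : List (Int × Int)} {f : Int → Bool}
    (hf : ∀ a b, pvSPair n hc vc a b → f a.1 = a.2 → f b.1 = b.2) {a b : Int × Bool}
    (h : Relation.ReflTransGen (pvSPair n hc vc) a b) : f a.1 = a.2 → f b.1 = b.2 := by
  induction h with
  | refl => exact id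
  | tail _ hstep ih => exact fun hfa => hf _ _ hstep (ih hfa)

lemma pvB_iff_sat (points : List Int) (k : Int) (hc vc : List (Int × Int)) :
    can_place_fries_exact_dp_alt points k hc vc = true ↔ pvSat points.length hc vc := by
  set n : Int := (points.length : Int) with hn0
  have hn : 0 ≤ n := by simp [hn0]
  have henc_t : ∀ x : Int, pvEnc (x, true) = 2 * x := by intro x; simp [pvEnc]
  have henc_f : ∀ x : Int, pvEnc (x, false) = 2 * x + 1 := by intro x; simp [pvEnc]
  have halt : can_place_fries_exact_dp_alt points k hc vc = true ↔
      ∀ x : Int, 0 ≤ x → x < n →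
        ¬(pvReach n hc vc (2 * x) (2 * x + 1) ∧ pvReach n hc vc (2 * x + 1) (2 * x)) := by
    unfold can_place_fries_exact_dp_alt
    rw [List.all_eq_true]
    constructor
    · intro h x h1 h2
      have hx := h x (PySem.List.mem_pyRange_one.2 ⟨h1, h2⟩)
      simp only [Bool.not_eq_eq_eq_not, Bool.not_true, Bool.and_eq_false_imp] at hx
      rintro ⟨hr1, hr2⟩
      have c1 : PySem.Set.contains (pvClosure n (pvAdjB n hc vc) (2 * x)) (2 * x + 1) = true :=
        (PySem.Set.contains_iff _ _).2 ((pvClosure_mem n hc vc hn (by omega) (by omega) _).2 hr1)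
      have c2 : PySem.Set.contains (pvClosure n (pvAdjB n hc vc) (2 * x + 1)) (2 * x) = true :=
        (PySem.Set.contains_iff _ _).2 ((pvClosure_mem n hc vc hn (by omega) (by omega) _).2 hr2)
      rw [hx c1] at c2
      exact absurd c2 (by decide)
    · intro h x hx
      have ⟨h1, h2⟩ := PySem.List.mem_pyRange_one.1 hx
      have hnr := h x h1 h2
      simp only [Bool.not_eq_eq_eq_not, Bool.not_true, Bool.and_eq_false_imp]
      intro c1
      by_contra c2
      rw [Bool.not_eq_false] at c2
      exact hnr ⟨(pvClosure_mem n hc vc hn (by omega) (by omega) _).1 ((PySem.Set.contains_iff _ _).1 c1),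
                 (pvClosure_mem n hc vc hn (by omega) (by omega) _).1 ((PySem.Set.contains_iff _ _).1 c2)⟩
  rw [halt, pvSat_iff_resp]
  constructor
  · intro h
    have hcrit : ∀ x ∈ Finset.Icc (0 : Int) (n - 1),
        ¬(Relation.ReflTransGen (pvSPair n hc vc) (x, true) (x, false) ∧
          Relation.ReflTransGen (pvSPair n hc vc) (x, false) (x, true)) := by
      intro x hxA
      rw [Finset.mem_Icc] at hxA
      rintro ⟨hr1, hr2⟩
      refine h x hxA.1 (by omega) ⟨?_, ?_⟩
      · have := (pvReach_iff_RT n hc vc (x, true) (x, false)).2 hr1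
        rwa [henc_t, henc_f] at this
      · have := (pvReach_iff_RT n hc vc (x, false) (x, true)).2 hr2
        rwa [henc_t, henc_f] at this
    obtain ⟨f, hf⟩ := pvAPT (pvSPair n hc vc) (pvSPair_skew n hc vc) (Finset.Icc 0 (n - 1)) hcrit
    exact ⟨f, fun a b hs => hf a b hs (pvSPair_vars hs).1 (pvSPair_vars hs).2⟩
  · rintro ⟨f, hf⟩ x h1 h2 ⟨hr1, hr2⟩
    have hrt1 := (pvReach_iff_RT n hc vc (x, true) (x, false)).1
      (by rwa [henc_t, henc_f])
    have hrt2 := (pvReach_iff_RT n hc vc (x, false) (x, true)).1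
      (by rwa [henc_t, henc_f])
    cases hfx : f x
    · have h3 := pvRT_preserve hf hrt2 hfx
      rw [hfx] at h3; simp at h3
    · have h3 := pvRT_preserve hf hrt1 hfx
      rw [hfx] at h3; simp at h3


-- ===== VERDICT (by name: the statement is the Claim_ definition above) =====
theorem can_place_fries_exact_dp_spec : Claim_equal_can_place_fries_exact_dp := by
  intro points k hc vc _hdom hpre
  unfold Spec_can_place_fries_exact_dp
  have ha := pvA_iff_sat points k hc vc hpre
  have hb := pvB_iff_sat points k hc vc
  cases hA : can_place_fries_exact_dp points k hc vc <;>
  cases hB : can_place_fries_exact_dp_alt points k hc vc <;> simp_all
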